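-- pv_equiv track=rewrite | github.com/aceladines/Thesis-API | service/naive-copy.py | search
-- ===== SOURCE A (Python) =====
-- def search(pattern, text):
--     windows = set()
--
--     m = len(pattern)
--     n = len(text)
--     q = 256
--     p = 0
--     t = 0
--     h = 1
--     d = 193939
--
--     for i in range(m-1):
--         h = (h * d) % q
--
--     # Calculate hash value for pattern and text
--     for i in range(m):
--         p = (d * p + ord(pattern[i])) % q
--         t = (d * t + ord(text[i])) % q
--
--     # Find the match and store the current window
--     for i in range(n-m+1):
--         windows.add(text[i:i+m])
--         if p == t:
--             for j in range(m):
--                 if text[i+j] != pattern[j]: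
--                     break
--             else:  # No break occurred, pattern found
--                 return pattern, windows
--         if i < n-m:
--             t = (d * (t - ord(text[i]) * h) + ord(text[i+m])) % q
--             if t < 0:
--                 t = t + q
--
--     return None, set()
-- ===== SOURCE B (Python) =====
-- def search(pattern, text):
--     windows = set()
--     m = len(pattern)
--     for i in range(len(text) - m + 1):
--         window = text[i:i+m]
--         windows.add(window)
--         if window == pattern:
--             return pattern, windows
--     return None, set()
-- ===== Notes on version B (the rewrite author's own statement) =====
-- stated objective: simpler
-- what changed: Replaced the Rabin-Karp rolling-hash machinery (precomputed hash powers, modular hash updates, char-by-char verification loop) with a single loop that compares each window slice to the pattern directly (per-window work moves from Python-level modular arithmetic to C-level slice/compare).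
import Mathlib
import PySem

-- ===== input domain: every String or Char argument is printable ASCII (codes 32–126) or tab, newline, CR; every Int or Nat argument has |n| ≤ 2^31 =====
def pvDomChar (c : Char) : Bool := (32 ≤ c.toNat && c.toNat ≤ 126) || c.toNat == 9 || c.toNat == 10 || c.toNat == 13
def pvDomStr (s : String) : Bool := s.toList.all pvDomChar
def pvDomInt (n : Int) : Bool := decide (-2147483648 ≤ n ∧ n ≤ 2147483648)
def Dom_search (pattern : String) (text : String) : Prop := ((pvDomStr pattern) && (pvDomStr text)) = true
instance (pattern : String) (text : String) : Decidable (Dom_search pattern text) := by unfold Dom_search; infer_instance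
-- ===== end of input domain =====

-- B replaces A's Rabin-Karp rolling-hash search by direct window-to-pattern comparison; same result, simpler code.

-- ===== PORT A =====
-- inner verification loop: 'for j in range(m): if text[i+j] != pattern[j]: break / else: match'
def searchVerify (ps cs : List Char) (i : Int) : List Int → Bool
  | [] => true
  | j :: rest =>
    if PySem.List.pyGetD cs (i + j) ' ' ≠ PySem.List.pyGetD ps j ' ' then false
    else searchVerify ps cs i rest

-- main loop: 'for i in range(n-m+1): …' with early return, carrying (t, windows)
def searchLoopA (pattern : String) (ps cs : List Char) (m n p h : Int) :
    List Int → Int → PySem.Set String → Option String × List String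
  | [], _, _ => (none, [])
  | i :: rest, t, windows =>
    let windows' := PySem.Set.add windows (String.ofList (PySem.List.slice cs (some i) (some (i + m))))
    if p = t ∧ searchVerify ps cs i (PySem.List.pyRange 0 m 1) = true then
      (some pattern, windows')
    else
      let t' :=
        if i < n - m then
          let u := PySem.Int.mod
            (193939 * (t - ((PySem.List.pyGetD cs i ' ').toNat : Int) * h)
              + ((PySem.List.pyGetD cs (i + m) ' ').toNat : Int)) 256
          if u < 0 then u + 256 else u
        else t
      searchLoopA pattern ps cs m n p h rest t' windows'

def search (pattern : String) (text : String) : Option String × List String :=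
  let ps := pattern.toList
  let cs := text.toList
  let m : Int := (ps.length : Int)
  let n : Int := (cs.length : Int)
  let q : Int := 256
  let d : Int := 193939
  let h : Int := (PySem.List.pyRange 0 (m - 1) 1).foldl (fun h _ => PySem.Int.mod (h * d) q) 1
  let pt : Int × Int := (PySem.List.pyRange 0 m 1).foldl
    (fun pt i =>
      (PySem.Int.mod (d * pt.1 + ((PySem.List.pyGetD ps i ' ').toNat : Int)) q,
       PySem.Int.mod (d * pt.2 + ((PySem.List.pyGetD cs i ' ').toNat : Int)) q)) (0, 0)
  searchLoopA pattern ps cs m n pt.1 h (PySem.List.pyRange 0 (n - m + 1) 1) pt.2 PySem.Set.empty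

-- ===== PORT B =====
def searchLoopB (pattern : String) (cs : List Char) (m : Int) :
    List Int → PySem.Set String → Option String × List String
  | [], _ => (none, [])
  | i :: rest, windows =>
    let w := String.ofList (PySem.List.slice cs (some i) (some (i + m)))
    let windows' := PySem.Set.add windows w
    if w = pattern then (some pattern, windows')
    else searchLoopB pattern cs m rest windows'

def search_alt (pattern : String) (text : String) : Option String × List String :=
  let cs := text.toList
  let m : Int := (pattern.toList.length : Int)
  searchLoopB pattern cs m (PySem.List.pyRange 0 ((cs.length : Int) - m + 1) 1) PySem.Set.empty

-- ===== PRECONDITION & SPEC =====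
-- Pre_ excludes exactly the inputs where A raises IndexError: a non-empty pattern longer than the text.
def Pre_search (pattern : String) (text : String) : Prop :=
  pattern.toList.length = 0 ∨ pattern.toList.length ≤ text.toList.length
instance (pattern : String) (text : String) : Decidable (Pre_search pattern text) := by
  unfold Pre_search; infer_instance
def pvWitness_search : String × String := ("ab", "xaby")

def Spec_search (pattern : String) (text : String) (out : Option String × List String) : Prop :=
  out = search_alt pattern text
instance (pattern : String) (text : String) (out : Option String × List String) :
    Decidable (Spec_search pattern text out) := by unfold Spec_search; infer_instance

-- ===== CLAIM (what is proved, stated in full; the proofs are below) =====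
def Claim_equal_search : Prop := ∀ (pattern : String) (text : String),
  Dom_search pattern text → Pre_search pattern text → Spec_search pattern text (search pattern text)

-- ===== LEMMAS AND PROOFS =====

-- integer (un-reduced) polynomial hash, and the mod-256 hash A's folds compute
def hashG (l : List Char) (a : Int) : Int := l.foldl (fun a c => 193939 * a + (c.toNat : Int)) a
def hashQ (l : List Char) (a : Int) : Int := l.foldl (fun a c => PySem.Int.mod (193939 * a + (c.toNat : Int)) 256) a

lemma hashQ_eq (l : List Char) : ∀ a : Int, hashQ l (PySem.Int.mod a 256) = PySem.Int.mod (hashG l a) 256 := by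
  induction l with
  | nil => intro a; rfl
  | cons c l ih =>
    intro a
    show hashQ l (PySem.Int.mod (193939 * PySem.Int.mod a 256 + (c.toNat:Int)) 256)
      = PySem.Int.mod (hashG l (193939 * a + (c.toNat:Int))) 256
    rw [show PySem.Int.mod (193939 * PySem.Int.mod a 256 + (c.toNat:Int)) 256
        = PySem.Int.mod (193939 * a + (c.toNat:Int)) 256 by
      simp [Int.add_emod, Int.mul_emod]]
    exact ih _

lemma hashQ_zero (l : List Char) : hashQ l 0 = PySem.Int.mod (hashG l 0) 256 := by
  have h := hashQ_eq l 0
  rw [show PySem.Int.mod (0:Int) 256 = 0 from rfl] at h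
  exact h

lemma hashG_append (l : List Char) (c : Char) (a : Int) :
    hashG (l ++ [c]) a = 193939 * hashG l a + (c.toNat : Int) := by
  simp [hashG, List.foldl_append]

lemma hashG_cons (c : Char) (l : List Char) :
    hashG (c :: l) 0 = (c.toNat : Int) * 193939 ^ l.length + hashG l 0 := by
  suffices h : ∀ (l : List Char) (a : Int), hashG l a = a * 193939 ^ l.length + hashG l 0 by
    have := h l (193939 * 0 + (c.toNat:Int))
    simp only [hashG, List.foldl_cons] at *
    rw [this]; ring
  intro l
  induction l with
  | nil => intro a; simp [hashG]
  | cons x l ih =>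
    intro a
    simp only [hashG, List.foldl_cons, List.length_cons] at *
    rw [ih (193939 * a + (x.toNat:Int)), ih (193939 * 0 + (x.toNat:Int))]
    ring

-- the h-loop computes d^k mod 256
lemma hpow (k : Nat) :
    (PySem.List.pyRange 0 (k : Int) 1).foldl (fun h _ => PySem.Int.mod (h * 193939) 256) 1
      = PySem.Int.mod ((193939 : Int) ^ k) 256 := by
  induction k with
  | zero => decide
  | succ k ih =>
    rw [show ((k+1 : Nat) : Int) = (k : Int) + 1 by push_cast; ring,
      PySem.List.pyRange_one_succ_right (by positivity), List.foldl_append, ih]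
    simp [List.foldl, Int.mul_emod, pow_succ]

-- fold of a pair of independent updates splits
lemma foldl_pair {α : Type} (f g : Int → α → Int) (l : List α) (a b : Int) :
    l.foldl (fun pt x => (f pt.1 x, g pt.2 x)) (a, b) = (l.foldl f a, l.foldl g b) := by
  induction l generalizing a b with
  | nil => rfl
  | cons x l ih => simp [List.foldl_cons, ih]

-- index fold over range(k) of pyGetD = fold over the take
lemma foldl_pyRange_take (cs : List Char) (f : Int → Char → Int) (a : Int)
    (k : Nat) (hk : k ≤ cs.length) :
    (PySem.List.pyRange 0 (k : Int) 1).foldl (fun t i => f t (PySem.List.pyGetD cs i ' ')) a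
      = (cs.take k).foldl f a := by
  rw [show (PySem.List.pyRange 0 (k:Int) 1).foldl (fun t i => f t (PySem.List.pyGetD cs i ' ')) a
      = (PySem.List.pyRange 0 ((cs.take k).length : Int) 1).foldl
          (fun t i => f t (PySem.List.pyGetD (cs.take k) i ' ')) a from ?_]
  · exact PySem.List.foldl_pyRange_zero_pyGetD (cs.take k) ' ' f a
  · rw [List.length_take, Nat.min_eq_left hk]
    apply PySem.List.foldl_congr_mem
    intro t i hi
    rw [PySem.List.mem_pyRange_one] at hi
    congr 1
    rw [PySem.List.pyGetD_eq_getElem cs ' ' hi.1 (by omega),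
      PySem.List.pyGetD_eq_getElem (List.take k cs) ' ' hi.1 (by simp only [List.length_take]; omega)]
    exact List.getElem_take.symm

-- the verification loop succeeds iff the whole window equals the pattern
lemma verify_aux (ps cs : List Char) (i : Int) (hi : 0 ≤ i)
    (hlen : i.toNat + ps.length ≤ cs.length) :
    ∀ fuel j : Nat, j + fuel = ps.length →
    (searchVerify ps cs i (PySem.List.pyRange (j : Int) (ps.length : Int) 1) = true ↔
      ∀ k : Nat, (hk : k < ps.length) → j ≤ k →
        cs[i.toNat + k]'(by omega) = ps[k]) := by
  intro fuel
  induction fuel with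
  | zero =>
    intro j hj
    rw [PySem.List.pyRange_one_eq_nil (by omega)]
    constructor
    · intro _ k hk hjk; omega
    · intro _; rfl
  | succ f ih =>
    intro j hj
    rw [PySem.List.pyRange_one_cons (by exact_mod_cast Nat.lt_of_lt_of_le (by omega) le_rfl)]
    show (if PySem.List.pyGetD cs (i + (j:Int)) ' ' ≠ PySem.List.pyGetD ps (j:Int) ' ' then false
        else searchVerify ps cs i (PySem.List.pyRange ((j:Int)+1) (ps.length : Int) 1)) = true ↔ _
    rw [PySem.List.pyGetD_eq_getElem cs ' ' (by omega) (by omega),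
      PySem.List.pyGetD_eq_getElem ps ' ' (by omega) (by omega),
      show ((j:Int)+1) = ((j+1 : Nat) : Int) by push_cast; ring]
    have hj1 : (j+1) + f = ps.length := by omega
    have hidx : (i + (j:Int)).toNat = i.toNat + j := by omega
    have hjn : ((j:Int)).toNat = j := by omega
    by_cases heq : cs[(i + (j:Int)).toNat]'(by omega) = ps[((j:Int)).toNat]'(by omega)
    · rw [if_neg (by simpa using heq), ih (j+1) hj1]
      constructor
      · intro hrest k hk hjk
        rcases Nat.eq_or_lt_of_le hjk with rfl | hlt
        · simpa [hidx, hjn] using heq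
        · exact hrest k hk hlt
      · intro hall k hk hjk
        exact hall k hk (by omega)
    · rw [if_pos (by simpa using heq)]
      simp only [Bool.false_eq_true, false_iff, not_forall]
      exact ⟨j, by omega, le_rfl, by simpa [hidx, hjn] using heq⟩

lemma verify_iff (ps cs : List Char) (i : Int) (hi : 0 ≤ i)
    (hlen : i.toNat + ps.length ≤ cs.length) :
    (searchVerify ps cs i (PySem.List.pyRange 0 (ps.length : Int) 1) = true)
      ↔ (cs.drop i.toNat).take ps.length = ps := by
  have h := verify_aux ps cs i hi hlen ps.length 0 (by omega)
  rw [show ((0:Nat) : Int) = 0 by rfl] at h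
  rw [h]
  constructor
  · intro hall
    apply List.ext_getElem
    · simp; omega
    · intro k h1 h2
      rw [List.getElem_take, List.getElem_drop]
      exact hall k h2 (by omega)
  · intro hW k hk _
    have h2 : ((cs.drop i.toNat).take ps.length)[k]'(by simp; omega) = ps[k] :=
      List.getElem_of_eq hW (by simp; omega)
    rw [List.getElem_take, List.getElem_drop] at h2
    exact h2

-- the rolling-hash update, as pure modular arithmetic
lemma roll (c D Gu c' : Int) :
    (193939 * ((c*D+Gu) % 256 - c * (D % 256)) + c') % 256 = (193939*Gu + c') % 256 := by
  have h1 : ∀ a : Int, a % 256 ≡ a [ZMOD 256] := fun a => Int.emod_emod_of_dvd a dvd_rfl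
  have key : 193939 * ((c*D+Gu) % 256 - c * (D % 256)) + c'
      ≡ 193939 * (c*D+Gu - c*D) + c' [ZMOD 256] :=
    (((h1 (c*D+Gu)).sub ((h1 D).mul_left c)).mul_left 193939).add_right c'
  have h2 : (193939 * ((c*D+Gu) % 256 - c * (D % 256)) + c') % 256
      = (193939 * (c*D+Gu - c*D) + c') % 256 := key
  rw [h2]; ring_nf

-- main loop equivalence: A's loop with t = hash of the current window equals B's loop
lemma loop_eq (pattern : String) (ps cs : List Char) (hps : ps = pattern.toList)
    (_hmn : ps.length ≤ cs.length) :
    ∀ fuel : Nat, ∀ i : Int, 0 ≤ i →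
    i + fuel = (cs.length : Int) - (ps.length : Int) + 1 →
    ∀ windows : PySem.Set String,
    searchLoopA pattern ps cs (ps.length : Int) (cs.length : Int) (hashQ ps 0)
        (PySem.Int.mod ((193939:Int) ^ (ps.length - 1)) 256)
        (PySem.List.pyRange i ((cs.length : Int) - (ps.length : Int) + 1) 1)
        (hashQ ((cs.drop i.toNat).take ps.length) 0) windows
      = searchLoopB pattern cs (ps.length : Int)
        (PySem.List.pyRange i ((cs.length : Int) - (ps.length : Int) + 1) 1) windows := by
  intro fuel
  induction fuel with
  | zero =>
    intro i hi0 hif windows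
    rw [PySem.List.pyRange_one_eq_nil (by omega)]
    rfl
  | succ f ih =>
    intro i hi0 hif windows
    have hilt : i ≤ (cs.length : Int) - (ps.length : Int) := by omega
    have hlen : i.toNat + ps.length ≤ cs.length := by omega
    rw [PySem.List.pyRange_one_cons (by omega)]
    have hslice : PySem.List.slice cs (some i) (some (i + (ps.length:Int)))
        = (cs.drop i.toNat).take ps.length := by
      rw [PySem.List.slice_toNat cs hi0 (by omega),
        show (i + (ps.length:Int)).toNat - i.toNat = ps.length by omega]
    simp only [searchLoopA, searchLoopB]
    by_cases hw : (cs.drop i.toNat).take ps.length = ps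
    · have hApos : hashQ ps 0 = hashQ ((cs.drop i.toNat).take ps.length) 0
          ∧ searchVerify ps cs i (PySem.List.pyRange 0 ((ps.length:Int)) 1) = true :=
        ⟨by rw [hw], (verify_iff ps cs i hi0 hlen).mpr hw⟩
      have hBpos : String.ofList (PySem.List.slice cs (some i) (some (i + (ps.length:Int)))) = pattern := by
        rw [hslice, hw, hps]
        exact String.ofList_toList
      rw [if_pos hApos, if_pos hBpos]
    · have hA : ¬ (hashQ ps 0 = hashQ ((cs.drop i.toNat).take ps.length) 0
          ∧ searchVerify ps cs i (PySem.List.pyRange 0 ((ps.length:Int)) 1) = true) := by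
        rintro ⟨-, hv⟩
        exact hw ((verify_iff ps cs i hi0 hlen).mp hv)
      have hB : ¬ String.ofList (PySem.List.slice cs (some i) (some (i + (ps.length:Int)))) = pattern := by
        intro habs
        apply hw
        have h3 := congrArg String.toList habs
        rw [String.toList_ofList] at h3
        rw [← hslice, h3]
        exact hps.symm
      rw [if_neg hA, if_neg hB]
      by_cases hlast : i < (cs.length : Int) - (ps.length : Int)
      · -- rolling update keeps the invariant
        have hm1 : 1 ≤ ps.length := by
          rcases Nat.eq_zero_or_pos ps.length with h0 | h1
          · exact absurd (by simp [List.eq_nil_of_length_eq_zero h0]) hw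
          · exact h1
        rw [if_pos hlast]
        have hc : PySem.List.pyGetD cs i ' ' = cs[i.toNat]'(by omega) :=
          PySem.List.pyGetD_eq_getElem cs ' ' hi0 (by omega)
        have hc' : PySem.List.pyGetD cs (i + (ps.length:Int)) ' '
            = cs[i.toNat + ps.length]'(by omega) := by
          rw [PySem.List.pyGetD_eq_getElem cs ' ' (by omega) (by omega)]
          congr 1
          omega
        -- window decompositions
        have hWdec : (cs.drop i.toNat).take ps.length
            = cs[i.toNat]'(by omega) :: (cs.drop (i.toNat+1)).take (ps.length - 1) := by
          conv_lhs => rw [List.drop_eq_getElem_cons (by omega),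
            show ps.length = (ps.length - 1) + 1 by omega, List.take_succ_cons]
        have hW'dec : (cs.drop (i+1).toNat).take ps.length
            = (cs.drop (i.toNat+1)).take (ps.length - 1) ++ [cs[i.toNat + ps.length]'(by omega)] := by
          conv_lhs => rw [show (i+1).toNat = i.toNat + 1 by omega,
            show ps.length = (ps.length - 1) + 1 by omega, List.take_add_one]
          rw [List.getElem?_drop, show i.toNat + 1 + (ps.length - 1) = i.toNat + ps.length by omega,
            List.getElem?_eq_getElem (by omega)]
          rfl
        have hulen : ((cs.drop (i.toNat+1)).take (ps.length - 1)).length = ps.length - 1 := by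
          simp only [List.length_take, List.length_drop]
          omega
        have hnn : ¬ (PySem.Int.mod
              (193939 * (hashQ ((cs.drop i.toNat).take ps.length) 0
                  - ((PySem.List.pyGetD cs i ' ').toNat : Int)
                    * PySem.Int.mod ((193939:Int) ^ (ps.length - 1)) 256)
                + ((PySem.List.pyGetD cs (i + (ps.length:Int)) ' ').toNat : Int)) 256 < 0) :=
          not_lt.mpr (PySem.Int.mod_nonneg _ (by norm_num))
        have hupd : PySem.Int.mod
              (193939 * (hashQ ((cs.drop i.toNat).take ps.length) 0
                  - ((PySem.List.pyGetD cs i ' ').toNat : Int)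
                    * PySem.Int.mod ((193939:Int) ^ (ps.length - 1)) 256)
                + ((PySem.List.pyGetD cs (i + (ps.length:Int)) ' ').toNat : Int)) 256
            = hashQ ((cs.drop (i+1).toNat).take ps.length) 0 := by
          rw [hc, hc', hashQ_zero, hashQ_zero, hW'dec, hashG_append, hWdec, hashG_cons, hulen]
          simp only [PySem.Int.mod_eq_emod_of_pos (show (0:Int) < 256 by norm_num)]
          exact roll _ _ _ _
        rw [if_neg hnn, hupd]
        exact ih (i+1) (by omega) (by omega) _
      · -- last iteration: the remaining range is empty, both loops return (none, [])
        rw [show (cs.length : Int) - (ps.length : Int) + 1 = i + 1 by omega,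
          PySem.List.pyRange_one_eq_nil (le_refl (i+1))]
        rfl

-- ===== VERDICT (by name: the statement is the Claim_ definition above) =====
theorem search_spec : Claim_equal_search := by
  intro pattern text _ hpre
  unfold Spec_search search search_alt
  have hmn : pattern.toList.length ≤ text.toList.length := by
    unfold Pre_search at hpre
    omega
  simp only []
  rw [foldl_pair
      (fun a i => PySem.Int.mod (193939 * a + ((PySem.List.pyGetD pattern.toList i ' ').toNat:Int)) 256)
      (fun a i => PySem.Int.mod (193939 * a + ((PySem.List.pyGetD text.toList i ' ').toNat:Int)) 256),
    foldl_pyRange_take pattern.toList (fun a c => PySem.Int.mod (193939 * a + (c.toNat:Int)) 256)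
      0 pattern.toList.length le_rfl,
    foldl_pyRange_take text.toList (fun a c => PySem.Int.mod (193939 * a + (c.toNat:Int)) 256)
      0 pattern.toList.length hmn, List.take_length]
  have hh : (PySem.List.pyRange 0 ((pattern.toList.length : Int) - 1) 1).foldl
      (fun h _ => PySem.Int.mod (h * 193939) 256) 1
      = PySem.Int.mod ((193939:Int) ^ (pattern.toList.length - 1)) 256 := by
    rcases Nat.eq_zero_or_pos pattern.toList.length with h0 | h1
    · rw [h0, PySem.List.pyRange_one_eq_nil (by norm_num)]
      decide
    · rw [show (pattern.toList.length : Int) - 1 = ((pattern.toList.length - 1 : Nat) : Int) by omega]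
      exact hpow (pattern.toList.length - 1)
  rw [hh]
  have := loop_eq pattern pattern.toList text.toList rfl hmn
    (text.toList.length - pattern.toList.length + 1) 0 le_rfl (by omega) PySem.Set.empty
  simpa [hashQ] using this
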